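-- pv_equiv track=rewrite | github.com/fdamore/QK | pqk/aux_funcs.py | adjacent_qub_obs
-- ===== SOURCE A (Python) =====
-- def adjacent_qub_obs(single_pauli_list, n_qub, non_locality):
--     global_Id = 'I' * n_qub
--     global_obs_list = []
--     for obs in single_pauli_list:
--         for i in range(n_qub):
--             global_obs = list(global_Id)
--             for j in range(non_locality):
--                 global_obs[(i+j)%n_qub] = obs
--             global_obs_list.append(''.join(global_obs))
--     return global_obs_list
-- ===== SOURCE B (Python) =====
-- def adjacent_qub_obs(single_pauli_list, n_qub, non_locality):
--     # Build ONE base row per observable (k leading obs cells, rest identity),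
--     # then emit every row as a cyclic right-rotation of that base by slicing.
--     k = max(0, min(non_locality, n_qub))
--     rows = []
--     for obs in single_pauli_list:
--         base = [obs] * k + ['I'] * (n_qub - k)
--         rows.extend(''.join(base[-i:] + base[:-i]) for i in range(n_qub))
--     return rows
-- ===== Notes on version B (the rewrite author's own statement) =====
-- stated objective: alternative
-- what changed: B builds one base row per observable (k = min(non_locality, n_qub) leading obs cells by list replication, rest identity) and emits every output row as a cyclic right-rotation of that base via slicing (base[-i:]+base[:-i]), instead of A's per-row copy-the-identity-and-assign-at-(i+j)%n loop.
import Mathlib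
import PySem

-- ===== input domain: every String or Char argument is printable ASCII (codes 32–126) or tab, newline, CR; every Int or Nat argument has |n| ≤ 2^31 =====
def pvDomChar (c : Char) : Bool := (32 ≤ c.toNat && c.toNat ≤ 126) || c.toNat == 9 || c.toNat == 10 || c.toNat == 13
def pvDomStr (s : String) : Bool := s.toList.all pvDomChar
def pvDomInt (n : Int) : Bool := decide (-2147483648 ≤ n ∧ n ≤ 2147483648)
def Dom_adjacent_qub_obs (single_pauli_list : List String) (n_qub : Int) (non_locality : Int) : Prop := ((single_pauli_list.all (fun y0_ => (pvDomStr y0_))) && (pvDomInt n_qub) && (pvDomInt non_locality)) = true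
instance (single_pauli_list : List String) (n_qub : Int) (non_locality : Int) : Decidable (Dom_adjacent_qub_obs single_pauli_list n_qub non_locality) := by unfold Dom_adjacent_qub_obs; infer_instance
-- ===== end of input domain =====

-- B builds one base row per observable by replication and produces each output row as a
-- cyclic right-rotation of that base via slicing, instead of A's per-row index assignments;
-- objective: alternative (a different production strategy of similar cost).

-- ===== PORT A =====
-- list('I' * n_qub) is a list of n_qub one-character strings "I" (n_qub ≤ 0 gives []);
-- exact as List.replicate n_qub.toNat "I".  global_obs[k] = obs is PySem.List.pySetD
-- (the index (i+j) % n_qub is in range whenever the statement runs: the i-loop being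
-- nonempty forces n_qub ≥ 1, and Python's % then yields 0 ≤ k < n_qub = len(global_obs)).
def adjacent_qub_obs (single_pauli_list : List String) (n_qub : Int) (non_locality : Int) : List String :=
  let global_Id : List String := List.replicate n_qub.toNat "I"
  single_pauli_list.foldl (fun global_obs_list obs =>
    (PySem.List.pyRange 0 n_qub 1).foldl (fun acc i =>
      let global_obs := (PySem.List.pyRange 0 non_locality 1).foldl
        (fun g j => PySem.List.pySetD g (PySem.Int.mod (i + j) n_qub) obs) global_Id
      acc ++ [PySem.Str.join "" global_obs]) global_obs_list) []

-- ===== PORT B =====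
-- [obs] * k + ['I'] * (n_qub - k) is List.replicate with toNat (negative counts give []);
-- base[-i:] / base[:-i] are PySem.List.slice with the int bound -i (exact, incl. i = 0).
def adjacent_qub_obs_alt (single_pauli_list : List String) (n_qub : Int) (non_locality : Int) : List String :=
  let k : Int := max 0 (min non_locality n_qub)
  single_pauli_list.foldl (fun rows obs =>
    let base : List String := List.replicate k.toNat obs ++ List.replicate (n_qub - k).toNat "I"
    rows ++ (PySem.List.pyRange 0 n_qub 1).map (fun i =>
      PySem.Str.join "" (PySem.List.slice base (some (-i)) none ++ PySem.List.slice base none (some (-i))))) []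

-- ===== PRECONDITION & SPEC =====
def Spec_adjacent_qub_obs (single_pauli_list : List String) (n_qub : Int) (non_locality : Int) (out : List String) : Prop := out = adjacent_qub_obs_alt single_pauli_list n_qub non_locality
instance (single_pauli_list : List String) (n_qub : Int) (non_locality : Int) (out : List String) : Decidable (Spec_adjacent_qub_obs single_pauli_list n_qub non_locality out) := by unfold Spec_adjacent_qub_obs; infer_instance

-- ===== CLAIM (what is proved, stated in full; the proofs are below) =====
def Claim_equal_adjacent_qub_obs : Prop := ∀ (single_pauli_list : List String) (n_qub : Int) (non_locality : Int), Dom_adjacent_qub_obs single_pauli_list n_qub non_locality → Spec_adjacent_qub_obs single_pauli_list n_qub non_locality (adjacent_qub_obs single_pauli_list n_qub non_locality)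

-- ===== LEMMAS AND PROOFS =====

-- append-one-element loops are maps
theorem pv_foldl_append_singleton {α β : Type} (l : List α) (f : α → β) (acc : List β) :
    l.foldl (fun a x => a ++ [f x]) acc = acc ++ l.map f := by
  induction l generalizing acc with
  | nil => simp
  | cons x t ih => simp [List.foldl_cons, ih]

-- append-a-block loops are flatMaps
theorem pv_foldl_append_block {α β : Type} (l : List α) (g : α → List β) (acc : List β) :
    l.foldl (fun a x => a ++ g x) acc = acc ++ l.flatMap g := by
  induction l generalizing acc with
  | nil => simp
  | cons x t ih => simp [List.foldl_cons, ih]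

-- what a loop of in-range same-value assignments computes, pointwise
theorem pv_foldl_pySetD_getElem? (l : List Int) (f : Int → Int) (init : List String)
    (obs : String) (hf : ∀ j ∈ l, 0 ≤ f j ∧ f j < (init.length : Int)) (p : Nat) :
    (l.foldl (fun g j => PySem.List.pySetD g (f j) obs) init)[p]? =
      if l.any (fun j => f j == (p : Int)) then some obs else init[p]? := by
  induction l generalizing init with
  | nil => simp
  | cons j t ih =>
    obtain ⟨hj0, hjlt⟩ := hf j (List.mem_cons_self ..)
    rw [List.foldl_cons, PySem.List.pySetD_of_nonneg init obs hj0,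
      ih (init.set (f j).toNat obs)
        (fun x hx => by simpa [List.length_set] using hf x (List.mem_cons_of_mem _ hx))]
    by_cases ht : t.any (fun x => f x == (p : Int)) = true
    · simp [List.any_cons, ht]
    · by_cases hj : f j = (p : Int)
      · have hpl : p < init.length := by omega
        have : (f j).toNat = p := by omega
        simp [List.any_cons, ht, hj, hpl]
      · have hne : (f j).toNat ≠ p := by omega
        rw [List.getElem?_set_ne hne]
        simp [List.any_cons, ht, hj]

theorem pv_emod_add_right (i x n : Int) : (i + x % n) % n = (i + x) % n := by
  conv_lhs => rw [Int.add_emod, Int.emod_emod_of_dvd _ dvd_rfl]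
  rw [← Int.add_emod]

theorem pv_emod_sub_left (x i n : Int) : (x % n - i) % n = (x - i) % n := by
  conv_lhs => rw [Int.sub_emod, Int.emod_emod_of_dvd _ dvd_rfl]
  rw [← Int.sub_emod]

theorem pv_emod_le_self {j n : Int} (hj : 0 ≤ j) (hn : 0 < n) : j % n ≤ j := by
  by_cases h : j < n
  · rw [Int.emod_eq_of_lt hj h]
  · have := Int.emod_lt_of_pos j hn
    omega

-- the hot-position characterisation: some assignment hits p  ↔  (p - i) % n < L
theorem pv_hot_iff (n L i : Int) (p : Nat) (hi : 0 ≤ i) (hin : i < n) (hp : (p : Int) < n) :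
    ((PySem.List.pyRange 0 L 1).any
        (fun j => PySem.Int.mod (i + j) n == (p : Int)) = true) ↔
      PySem.Int.mod ((p : Int) - i) n < L := by
  have hn : 0 < n := lt_of_le_of_lt hi hin
  have hmod : ∀ a : Int, PySem.Int.mod a n = a % n :=
    fun a => PySem.Int.mod_eq_emod_of_pos (a := a) hn
  constructor
  · intro h
    rcases List.any_eq_true.mp h with ⟨j, hjmem, hj⟩
    rcases PySem.List.mem_pyRange_one.mp hjmem with ⟨hj0, hjL⟩
    have hj1 : (i + j) % n = (p : Int) := by
      rw [hmod] at hj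
      exact eq_of_beq hj
    rw [hmod]
    have : ((p : Int) - i) % n = j % n := by
      rw [← hj1, pv_emod_sub_left]
      congr 1
      ring
    rw [this]
    calc j % n ≤ j := pv_emod_le_self hj0 hn
      _ < L := hjL
  · intro h
    rw [hmod] at h
    set q := ((p : Int) - i) % n with hq
    have hq0 : 0 ≤ q := Int.emod_nonneg _ (by omega)
    refine List.any_eq_true.mpr ⟨q, PySem.List.mem_pyRange_one.mpr ⟨hq0, h⟩, ?_⟩
    have heq : (i + q) % n = (p : Int) := by
      rw [hq, pv_emod_add_right]
      have h2 : i + ((p : Int) - i) = (p : Int) := by ring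
      rw [h2, Int.emod_eq_of_lt (by positivity) hp]
    rw [hmod, heq]
    simp

-- the closed-form row both sides are reduced to
def pvRow (n L i : Int) (obs : String) : List String :=
  (PySem.List.pyRange 0 n 1).map (fun p => if PySem.Int.mod (p - i) n < L then obs else "I")

-- one row of A equals the closed-form row
theorem pv_row_eq (n L i : Int) (obs : String) (hi : 0 ≤ i) (hin : i < n) :
    (PySem.List.pyRange 0 L 1).foldl
        (fun g j => PySem.List.pySetD g (PySem.Int.mod (i + j) n) obs)
        (List.replicate n.toNat "I")
      = pvRow n L i obs := by
  have hn : 0 < n := lt_of_le_of_lt hi hin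
  apply List.ext_getElem?
  intro p
  rw [pv_foldl_pySetD_getElem? _ _ _ _
    (fun j _ => ⟨PySem.Int.mod_nonneg (i + j) hn, by
      have := PySem.Int.mod_lt (i + j) hn
      simp only [List.length_replicate]
      omega⟩) p]
  rw [pvRow, PySem.List.pyRange_one 0 n, List.getElem?_map, List.getElem?_map]
  simp only [Int.sub_zero]
  by_cases hp : p < n.toNat
  · have hpn : (p : Int) < n := by omega
    rw [List.getElem?_range (by omega), List.getElem?_replicate]
    simp only [Option.map_some, if_pos hp, zero_add]
    by_cases hhot : PySem.Int.mod ((p : Int) - i) n < L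
    · rw [if_pos ((pv_hot_iff n L i p hi hin hpn).mpr hhot), if_pos hhot]
    · rw [if_neg (fun hc => hhot ((pv_hot_iff n L i p hi hin hpn).mp hc)), if_neg hhot]
  · have hfalse : (PySem.List.pyRange 0 L 1).any
        (fun j => PySem.Int.mod (i + j) n == (p : Int)) = false := by
      rw [List.any_eq_false]
      intro j _
      have h1 := PySem.Int.mod_lt (i + j) hn
      simp only [beq_iff_eq]
      omega
    rw [hfalse]
    have h1 : (List.range n.toNat)[p]? = none := by
      simp only [List.getElem?_eq_none_iff, List.length_range]
      omega
    have h2 : (List.replicate n.toNat ("I" : String))[p]? = none := by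
      simp only [List.getElem?_eq_none_iff, List.length_replicate]
      omega
    rw [h1, h2]
    simp

-- one rotation of B's base equals the closed-form row
theorem pv_rot_eq (n L i : Int) (obs : String) (hi : 0 ≤ i) (hin : i < n) :
    (PySem.List.slice
        (List.replicate (max 0 (min L n)).toNat obs
          ++ List.replicate (n - max 0 (min L n)).toNat "I") (some (-i)) none
      ++ PySem.List.slice
        (List.replicate (max 0 (min L n)).toNat obs
          ++ List.replicate (n - max 0 (min L n)).toNat "I") none (some (-i)))
      = pvRow n L i obs := by
  have hn : 0 < n := lt_of_le_of_lt hi hin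
  set k : Int := max 0 (min L n) with hk
  set base : List String :=
    List.replicate k.toNat obs ++ List.replicate (n - k).toNat "I" with hbase
  have hlen : base.length = n.toNat := by
    simp only [hbase, List.length_append, List.length_replicate]
    omega
  -- base[q]? = some (obs or "I") for q < n
  have hbaseGet : ∀ q : Nat, q < n.toNat →
      base[q]? = some (if (q : Int) < k then obs else "I") := by
    intro q hq
    by_cases hqk : (q : Int) < k
    · have hq' : q < k.toNat := by omega
      rw [hbase, List.getElem?_append_left (by simpa using hq'), List.getElem?_replicate]
      simp [hq', hqk]
    · have hq1 : ¬ q < k.toNat := by omega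
      rw [hbase, List.getElem?_append_right (by simp; omega), List.getElem?_replicate]
      simp only [List.length_replicate]
      have : q - k.toNat < (n - k).toNat := by omega
      simp [this, hqk]
  by_cases hi0 : i = 0
  · -- rotation by 0: base ++ [] = base, pointwise equal to the row
    subst hi0
    have hs1' : PySem.List.slice base (some (-(0:Int))) none = base := by
      rw [show (-(0:Int)) = ((0:Nat) : Int) from rfl, PySem.List.slice_from_natCast]
      simp
    have hs2' : PySem.List.slice base none (some (-(0:Int))) = [] := by
      rw [show (-(0:Int)) = ((0:Nat) : Int) from rfl, PySem.List.slice_to_natCast]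
      simp
    rw [hs1', hs2', List.append_nil]
    apply List.ext_getElem?
    intro p
    rw [pvRow, PySem.List.pyRange_one 0 n, List.getElem?_map, List.getElem?_map]
    simp only [Int.sub_zero]
    by_cases hp : p < n.toNat
    · rw [List.getElem?_range hp, hbaseGet p hp]
      have hpn : ((p : Int)) < n := by omega
      have hmod : PySem.Int.mod ((p : Int)) n = (p : Int) := by
        rw [PySem.Int.mod_eq_emod_of_pos hn, Int.emod_eq_of_lt (by omega) hpn]
      simp only [zero_add, Option.map_some, hmod]
      have hiff : ((p : Int) < L) ↔ ((p : Int) < k) := by omega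
      by_cases hc : (p : Int) < L
      · rw [if_pos (hiff.mp hc), if_pos hc]
      · rw [if_neg (fun h => hc (hiff.mpr h)), if_neg hc]
    · have h1 : base[p]? = none := List.getElem?_eq_none (by omega)
      have h2 : (List.range n.toNat)[p]? = none :=
        List.getElem?_eq_none (by simp only [List.length_range]; omega)
      rw [h1, h2]
      simp
  · have hipos : 0 < i.toNat := by omega
    have hiltn : i.toNat < n.toNat := by omega
    have hieq : i = ((i.toNat : Nat) : Int) := by omega
    have hs1 : PySem.List.slice base (some (-i)) none = base.drop (n.toNat - i.toNat) := by
      rw [hieq, PySem.List.slice_from_neg_natCast base i.toNat hipos, hlen]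
      simp only [Int.toNat_natCast]
    have hs2 : PySem.List.slice base none (some (-i)) = base.take (n.toNat - i.toNat) := by
      rw [hieq, PySem.List.slice_to_neg_natCast base i.toNat hipos, hlen]
      simp only [Int.toNat_natCast]
    rw [hs1, hs2]
    apply List.ext_getElem?
    intro p
    rw [pvRow, PySem.List.pyRange_one 0 n, List.getElem?_map, List.getElem?_map]
    simp only [Int.sub_zero]
    by_cases hp : p < n.toNat
    · have hlen1 : (base.drop (n.toNat - i.toNat)).length = i.toNat := by
        simp [hlen]; omega
      -- index into base that position p of the rotation reads
      have hidx : (base.drop (n.toNat - i.toNat) ++ base.take (n.toNat - i.toNat))[p]? =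
          base[(if p < i.toNat then n.toNat - i.toNat + p else p - i.toNat)]? := by
        by_cases hpi : p < i.toNat
        · rw [List.getElem?_append_left (by omega), List.getElem?_drop]
          simp [hpi]
        · rw [List.getElem?_append_right (by omega), hlen1,
            List.getElem?_take_of_lt (by omega)]
          simp [hpi]
      rw [hidx, List.getElem?_range hp]
      set q : Nat := if p < i.toNat then n.toNat - i.toNat + p else p - i.toNat with hq
      have hqn : q < n.toNat := by rw [hq]; split <;> omega
      rw [hbaseGet q hqn]
      have hmodq : PySem.Int.mod ((p : Int) - i) n = (q : Int) := by
        rw [PySem.Int.mod_eq_emod_of_pos hn, hq]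
        by_cases hpi : p < i.toNat
        · have : ((p : Int) - i) % n = ((p : Int) - i + n) % n := by
            rw [Int.add_emod_right]
          rw [this, Int.emod_eq_of_lt (by omega) (by omega)]
          simp [hpi]; omega
        · rw [Int.emod_eq_of_lt (by omega) (by omega)]
          simp [hpi]; omega
      simp only [zero_add, Option.map_some, hmodq]
      have hiff : ((q : Int) < L) ↔ ((q : Int) < k) := by omega
      by_cases hc : (q : Int) < L
      · rw [if_pos (hiff.mp hc), if_pos hc]
      · rw [if_neg (fun h => hc (hiff.mpr h)), if_neg hc]
    · have h1 : (base.drop (n.toNat - i.toNat) ++ base.take (n.toNat - i.toNat))[p]? = none :=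
        List.getElem?_eq_none (by simp only [List.length_append, List.length_drop,
          List.length_take, hlen]; omega)
      have h2 : (List.range n.toNat)[p]? = none :=
        List.getElem?_eq_none (by simp only [List.length_range]; omega)
      rw [h1, h2]
      simp

-- ===== VERDICT (by name: the statement is the Claim_ definition above) =====
theorem adjacent_qub_obs_spec : Claim_equal_adjacent_qub_obs := by
  intro spl n L _
  unfold Spec_adjacent_qub_obs adjacent_qub_obs adjacent_qub_obs_alt
  simp only [pv_foldl_append_singleton, pv_foldl_append_block, List.nil_append]
  refine List.flatMap_congr ?_
  intro obs _
  refine List.map_congr_left ?_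
  intro i hi
  rcases PySem.List.mem_pyRange_one.mp hi with ⟨h0, h1⟩
  rw [pv_row_eq n L i obs h0 h1, ← pv_rot_eq n L i obs h0 h1]
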